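-- pv_equiv track=rewrite | github.com/Aasthaengg/IBMdataset | Python_codes/p02270/s631622660.py | is_capable
-- ===== SOURCE A (Python) =====
-- def is_capable(n, k, w, P):
--     track = 0
--     cnt = 0
--     i = 0
--
--     while cnt < k:
--         if i == n:
--             return i
--
--         if track + w[i] > P:
--             track = 0
--             cnt += 1
--         else:
--             track += w[i]
--             i += 1
--
--     return i
--     pass
-- ===== SOURCE B (Python) =====
-- def is_capable(n, k, w, P):
--     # Binary search the answer: the largest m in [0, n] such that the first m
--     # packages can be loaded onto at most k tracks (checked by a boolean
--     # feasibility test), instead of simulating the greedy to its final index.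
--     def fits(m):
--         t, i = 0, 0
--         while t < k and i < m:
--             load = 0
--             while i < m and load + w[i] <= P:
--                 load += w[i]
--                 i += 1
--             t += 1
--         return i >= m
--
--     lo, hi = 0, n
--     while lo < hi:
--         mid = (lo + hi + 1) // 2
--         if fits(mid):
--             lo = mid
--         else:
--             hi = mid - 1
--     return lo
-- ===== Notes on version B (the rewrite author's own statement) =====
-- stated objective: alternative
-- what changed: Instead of A's direct greedy simulation that tracks (track, cnt, i) and returns the final index, B binary-searches the answer: it finds the largest prefix length m in [0, n] for which a boolean feasibility checker says the first m packages fit onto at most k tracks.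
-- outside the precondition, e.g. on is_capable(-1, 1, [3, 5], 4): A returns 1, B returns 0
import Mathlib
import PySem

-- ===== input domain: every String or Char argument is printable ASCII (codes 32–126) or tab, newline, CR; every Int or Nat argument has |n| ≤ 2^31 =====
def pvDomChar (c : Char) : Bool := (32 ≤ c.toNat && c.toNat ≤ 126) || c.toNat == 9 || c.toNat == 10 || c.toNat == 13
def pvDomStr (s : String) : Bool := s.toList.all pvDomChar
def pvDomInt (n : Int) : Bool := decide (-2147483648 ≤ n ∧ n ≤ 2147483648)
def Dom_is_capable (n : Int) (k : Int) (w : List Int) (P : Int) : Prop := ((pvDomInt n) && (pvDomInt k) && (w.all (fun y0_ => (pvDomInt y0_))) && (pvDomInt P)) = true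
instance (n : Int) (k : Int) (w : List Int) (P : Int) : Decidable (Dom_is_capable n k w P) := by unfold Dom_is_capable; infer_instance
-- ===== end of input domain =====

-- B replaces A's direct greedy simulation by a binary search on the answer: the
-- largest prefix length m such that the first m packages fit onto at most k
-- tracks, tested by a boolean feasibility checker (alternative algorithm).


-- ===== PORT A =====
-- A's while loop over state (track, cnt, i); the fuel only makes the recursion total
-- (inside Pre_ the loop runs at most (k - cnt) + (n - i) more steps, so it never runs out).
def isCapLoopA (w : List Int) (n k P : Int) : Nat → Int → Int → Int → Int
  | 0, _, _, i => i
  | fuel + 1, track, cnt, i =>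
    if cnt < k then
      if i = n then i
      else
        match PySem.List.pyGet? w i with
        | none => i  -- IndexError in Python; excluded by Pre_
        | some wi =>
          if track + wi > P then isCapLoopA w n k P fuel 0 (cnt + 1) i
          else isCapLoopA w n k P fuel (track + wi) cnt (i + 1)
    else i

def is_capable (n : Int) (k : Int) (w : List Int) (P : Int) : Int :=
  isCapLoopA w n k P (k.toNat + n.toNat + 1) 0 0 0

-- ===== PORT B =====
-- fits' inner while: load packages from i while i < m and load + w[i] <= P
def fitsInnerB (w : List Int) (m P load i : Int) : Int :=
  if _h : i < m then
    match PySem.List.pyGet? w i with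
    | none => i  -- IndexError in Python; excluded by Pre_
    | some wi => if load + wi ≤ P then fitsInnerB w m P (load + wi) (i + 1) else i
  else i
termination_by (m - i).toNat
decreasing_by omega

-- fits' outer while over t < k (fuel = number of remaining tracks)
def fitsOuterB (w : List Int) (m P : Int) : Nat → Int → Int
  | 0, i => i
  | f + 1, i => if i < m then fitsOuterB w m P f (fitsInnerB w m P 0 i) else i

-- fits(m): can the first m packages be loaded using at most k tracks?
def fitsB (k : Int) (w : List Int) (P m : Int) : Bool :=
  decide (m ≤ fitsOuterB w m P k.toNat 0)

-- binary search: while lo < hi: mid = (lo+hi+1)//2; if fits(mid): lo = mid else hi = mid-1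
def bsearchB (k : Int) (w : List Int) (P : Int) : Nat → Int → Int → Int
  | 0, lo, _ => lo
  | f + 1, lo, hi =>
    if lo < hi then
      if fitsB k w P (PySem.Int.floordiv (lo + hi + 1) 2) then
        bsearchB k w P f (PySem.Int.floordiv (lo + hi + 1) 2) hi
      else
        bsearchB k w P f lo (PySem.Int.floordiv (lo + hi + 1) 2 - 1)
    else lo

def is_capable_alt (n : Int) (k : Int) (w : List Int) (P : Int) : Int :=
  bsearchB k w P (n.toNat + 1) 0 n

-- ===== PRECONDITION & SPEC =====
-- Pre_ excludes inputs where n lies outside [0, len(w)] (A ignores n as an upper bound and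
-- reads past it, usually raising IndexError; where it still returns, the value is an
-- artefact of that overrun — see cites), EXCEPT the cases where A provably never reads
-- past w and returns the greedy count anyway: k <= 0, or a first package already over P.
def Pre_is_capable (n : Int) (k : Int) (w : List Int) (P : Int) : Prop :=
  (0 ≤ n ∧ n ≤ w.length) ∨ k ≤ 0 ∨ (w ≠ [] ∧ P < w.headI)

instance (n : Int) (k : Int) (w : List Int) (P : Int) : Decidable (Pre_is_capable n k w P) := by
  unfold Pre_is_capable; infer_instance

def pvWitness_is_capable : Int × Int × List Int × Int := (3, 2, [1, 2, 3], 4)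

def Spec_is_capable (n : Int) (k : Int) (w : List Int) (P : Int) (out : Int) : Prop := out = is_capable_alt n k w P
instance (n : Int) (k : Int) (w : List Int) (P : Int) (out : Int) : Decidable (Spec_is_capable n k w P out) := by unfold Spec_is_capable; infer_instance

-- ===== CLAIM (what is proved, stated in full; the proofs are below) =====
def Claim_equal_is_capable : Prop := ∀ (n : Int) (k : Int) (w : List Int) (P : Int), Dom_is_capable n k w P → Pre_is_capable n k w P → Spec_is_capable n k w P (is_capable n k w P)

-- ===== LEMMAS AND PROOFS =====

-- proof-only greedy fill (A's track-filling step, bounded by n, not by m)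
def fillTrackB (w : List Int) (n P track i : Int) : Int :=
  if _h : i < n then
    match PySem.List.pyGet? w i with
    | none => i
    | some wi =>
      if track + wi ≤ P then fillTrackB w n P (track + wi) (i + 1) else i
  else i
termination_by (n - i).toNat
decreasing_by omega

theorem fillTrackB_stop {w : List Int} {n P track i : Int} (h : ¬ i < n) :
    fillTrackB w n P track i = i := by
  rw [fillTrackB]; simp [h]

theorem fillTrackB_bounds (w : List Int) (n P track i : Int) :
    i ≤ fillTrackB w n P track i ∧ (i ≤ n → fillTrackB w n P track i ≤ n) := by
  rw [fillTrackB]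
  by_cases h : i < n
  · rw [dif_pos h]
    cases hg : PySem.List.pyGet? w i with
    | none => simp only; exact ⟨le_rfl, fun h2 => h2⟩
    | some wi =>
      simp only
      by_cases hfit : track + wi ≤ P
      · rw [if_pos hfit]
        have hrec := fillTrackB_bounds w n P (track + wi) (i + 1)
        exact ⟨by omega, fun _ => hrec.2 (by omega)⟩
      · rw [if_neg hfit]; exact ⟨le_rfl, fun h2 => h2⟩
  · rw [dif_neg h]; exact ⟨le_rfl, fun h2 => h2⟩
termination_by (n - i).toNat
decreasing_by omega

theorem iterate_fill_ge (w : List Int) (n P : Int) :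
    ∀ (f : Nat) (i : Int), i ≤ (fun j => fillTrackB w n P 0 j)^[f] i := by
  intro f
  induction f with
  | zero => intro i; simp
  | succ f ih =>
    intro i
    rw [Function.iterate_succ_apply]
    exact le_trans (fillTrackB_bounds w n P 0 i).1 (ih _)

theorem iterate_fill_le (w : List Int) (n P : Int) :
    ∀ (f : Nat) (i : Int), i ≤ n → (fun j => fillTrackB w n P 0 j)^[f] i ≤ n := by
  intro f
  induction f with
  | zero => intro i h; simpa using h
  | succ f ih =>
    intro i h
    rw [Function.iterate_succ_apply]
    exact ih _ ((fillTrackB_bounds w n P 0 i).2 h)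

-- fits' inner loop is A's greedy fill truncated at m
theorem inner_min (w : List Int) (n m P : Int) (hmn : m ≤ n) (load i : Int) (him : i ≤ m) :
    fitsInnerB w m P load i = min (fillTrackB w n P load i) m := by
  rw [fitsInnerB]
  by_cases h : i < m
  · rw [dif_pos h, fillTrackB, dif_pos (show i < n by omega)]
    cases hg : PySem.List.pyGet? w i with
    | none => simp only; omega
    | some wi =>
      simp only
      by_cases hfit : load + wi ≤ P
      · rw [if_pos hfit, if_pos hfit]
        exact inner_min w n m P hmn (load + wi) (i + 1) (by omega)
      · rw [if_neg hfit, if_neg hfit]; omega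
  · rw [dif_neg h]
    have := (fillTrackB_bounds w n P load i).1
    omega
termination_by (m - i).toNat
decreasing_by omega

-- fits' outer loop computes min over m of A's track iteration
theorem outer_min (w : List Int) (n m P : Int) (hmn : m ≤ n) :
    ∀ (f : Nat) (i : Int), i ≤ m →
      fitsOuterB w m P f i = min ((fun j => fillTrackB w n P 0 j)^[f] i) m := by
  intro f
  induction f with
  | zero => intro i h; simp only [fitsOuterB, Function.iterate_zero, id_eq]; omega
  | succ f ih =>
    intro i him
    rw [fitsOuterB, Function.iterate_succ_apply]
    by_cases h : i < m
    · rw [if_pos h, inner_min w n m P hmn 0 i him]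
      by_cases hF : fillTrackB w n P 0 i ≤ m
      · rw [min_eq_left hF]
        exact ih _ hF
      · rw [min_eq_right (by omega)]
        rw [ih m le_rfl]
        have h1 := iterate_fill_ge w n P f (fillTrackB w n P 0 i)
        have h2 := iterate_fill_ge w n P f m
        omega
    · rw [if_neg h]
      have h1 := iterate_fill_ge w n P f (fillTrackB w n P 0 i)
      have h2 := (fillTrackB_bounds w n P 0 i).1
      omega

-- generic correctness of B's binary search, given fits ⇔ (m ≤ ans) on [0, hi₀]
theorem bsearchB_correct (k : Int) (w : List Int) (P ans hi0 : Int)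
    (hf : ∀ m : Int, 0 ≤ m → m ≤ hi0 → (fitsB k w P m = true ↔ m ≤ ans)) :
    ∀ (fuel : Nat) (lo hi : Int), 0 ≤ lo → lo ≤ ans → ans ≤ hi → hi ≤ hi0 →
      (hi - lo).toNat < fuel → bsearchB k w P fuel lo hi = ans := by
  intro fuel
  induction fuel with
  | zero => intro lo hi _ _ _ _ hfu; omega
  | succ fuel ih =>
    intro lo hi hlo0 hloa hahi hhi0 hfu
    rw [bsearchB]
    by_cases hlh : lo < hi
    · rw [if_pos hlh]
      have hmid : PySem.Int.floordiv (lo + hi + 1) 2 = (lo + hi + 1) / 2 :=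
        PySem.Int.floordiv_eq_ediv_of_pos (by omega)
      set mid := PySem.Int.floordiv (lo + hi + 1) 2 with hmdef
      have hb : lo < mid ∧ mid ≤ hi := by omega
      by_cases hfit : fitsB k w P mid = true
      · rw [if_pos hfit]
        have hma : mid ≤ ans := (hf mid (by omega) (by omega)).1 hfit
        exact ih mid hi (by omega) hma hahi hhi0 (by omega)
      · rw [if_neg hfit]
        have hma : ¬ (mid ≤ ans) := fun hh => hfit ((hf mid (by omega) (by omega)).2 hh)
        exact ih lo (mid - 1) hlo0 hloa (by omega) (by omega) (by omega)
    · rw [if_neg hlh]; omega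

-- A's loop from any mid-track state equals: finish the current track with the greedy
-- fill, then run the remaining full tracks.
theorem loopA_eq (w : List Int) (n k P : Int) (hn : n ≤ (w.length : Int)) :
    ∀ (fuel : Nat) (track cnt i : Int), 0 ≤ i → i ≤ n →
      (k - cnt).toNat + (n - i).toNat < fuel →
      isCapLoopA w n k P fuel track cnt i =
        if (k - cnt).toNat = 0 then i
        else (fun j => fillTrackB w n P 0 j)^[(k - cnt).toNat - 1] (fillTrackB w n P track i) := by
  intro fuel
  induction fuel with
  | zero => intro track cnt i _ _ hf; omega
  | succ fuel ih =>
    intro track cnt i hi0 hin hf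
    by_cases hck : cnt < k
    · have hm : (k - cnt).toNat ≠ 0 := by omega
      rw [isCapLoopA, if_pos hck, if_neg hm]
      by_cases hieq : i = n
      · subst hieq
        rw [if_pos rfl, fillTrackB_stop (lt_irrefl i)]
        exact (Function.iterate_fixed (fillTrackB_stop (by omega)) _).symm
      · rw [if_neg hieq]
        have hilt : i < n := lt_of_le_of_ne hin hieq
        have hget : PySem.List.pyGet? w i = some (w[i.toNat]) := by
          rw [PySem.List.pyGet?_of_nonneg w hi0]
          exact List.getElem?_eq_getElem (by omega)
        simp only [hget]
        set wi := w[i.toNat] with hwi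
        by_cases hov : track + wi > P
        · rw [if_pos hov]
          rw [ih 0 (cnt + 1) i hi0 hin (by omega)]
          have hfill : fillTrackB w n P track i = i := by
            rw [fillTrackB]
            simp only [dif_pos hilt, hget]
            rw [if_neg (by omega)]
          rw [hfill]
          rcases Nat.eq_or_lt_of_le (Nat.one_le_iff_ne_zero.mpr hm) with h1 | h2
          · rw [if_pos (by omega), show (k - cnt).toNat - 1 = 0 by omega]
            rfl
          · rw [if_neg (by omega)]
            have hs : (k - cnt).toNat - 1 = ((k - (cnt + 1)).toNat - 1) + 1 := by omega
            rw [hs, Function.iterate_succ_apply]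
        · rw [if_neg hov]
          rw [ih (track + wi) cnt (i + 1) (by omega) (by omega) (by omega)]
          rw [if_neg hm]
          have hfill : fillTrackB w n P track i = fillTrackB w n P (track + wi) (i + 1) := by
            rw [fillTrackB]
            simp only [dif_pos hilt, hget]
            rw [if_pos (by omega)]
          rw [hfill]
    · rw [isCapLoopA]
      simp [hck, show (k - cnt).toNat = 0 by omega]

-- when the first package already exceeds P, A overflows k times without moving i
theorem loopA_stuck (w : List Int) (n k P w0 : Int)
    (hw : PySem.List.pyGet? w 0 = some w0) (hP : P < w0) :
    ∀ (fuel : Nat) (cnt : Int), (k - cnt).toNat < fuel →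
      isCapLoopA w n k P fuel 0 cnt 0 = 0 := by
  intro fuel
  induction fuel with
  | zero => intro cnt h; omega
  | succ fuel ih =>
    intro cnt h
    rw [isCapLoopA]
    by_cases hck : cnt < k
    · rw [if_pos hck]
      by_cases hn : (0 : Int) = n
      · rw [if_pos hn]
      · rw [if_neg hn]
        simp only [hw]
        rw [if_pos (by omega)]
        exact ih (cnt + 1) (by omega)
    · rw [if_neg hck]

-- and fits' inner loop likewise never moves i there, so fits m holds only for m ≤ 0
theorem outerB_stuck (w : List Int) (P w0 : Int)
    (hw : PySem.List.pyGet? w 0 = some w0) (hP : P < w0) :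
    ∀ (f : Nat) (m : Int), fitsOuterB w m P f 0 = 0 := by
  intro f
  induction f with
  | zero => intro m; rfl
  | succ f ih =>
    intro m
    rw [fitsOuterB]
    by_cases hm : (0 : Int) < m
    · rw [if_pos hm]
      have hj : fitsInnerB w m P 0 0 = 0 := by
        rw [fitsInnerB]
        rw [dif_pos hm]
        simp only [hw]
        rw [if_neg (by omega)]
      rw [hj]; exact ih m
    · rw [if_neg hm]

-- ===== VERDICT (by name: the statement is the Claim_ definition above) =====
theorem is_capable_spec : Claim_equal_is_capable := by
  intro n k w P _ hpre
  unfold Spec_is_capable is_capable is_capable_alt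
  rcases hpre with ⟨hn0, hnl⟩ | hk0 | ⟨hne, hhd⟩
  · -- main case: 0 ≤ n ≤ len w; A computes the k-fold greedy fill, B binary-searches it
    set ans := (fun j => fillTrackB w n P 0 j)^[k.toNat] 0 with hansdef
    have hA : isCapLoopA w n k P (k.toNat + n.toNat + 1) 0 0 0 = ans := by
      rw [loopA_eq w n k P hnl (k.toNat + n.toNat + 1) 0 0 0 le_rfl hn0 (by omega)]
      simp only [sub_zero]
      by_cases hk : k.toNat = 0
      · simp [hansdef, hk]
      · have hstep : ans = (fun j => fillTrackB w n P 0 j)^[k.toNat - 1] (fillTrackB w n P 0 0) := by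
          rw [hansdef, show k.toNat = (k.toNat - 1) + 1 by omega, Function.iterate_succ_apply, Nat.add_sub_cancel]
        rw [if_neg hk, hstep]
    rw [hA]
    have hans0 : 0 ≤ ans := iterate_fill_ge w n P k.toNat 0
    have hansn : ans ≤ n := iterate_fill_le w n P k.toNat 0 hn0
    refine (bsearchB_correct k w P ans n ?_ (n.toNat + 1) 0 n le_rfl hans0 hansn le_rfl
      (by omega)).symm
    intro m hm0 hmn
    unfold fitsB
    rw [outer_min w n m P hmn k.toNat 0 hm0, ← hansdef]
    simp only [decide_eq_true_eq]
    omega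
  · -- k ≤ 0: A loads nothing, every fits(m) with m ≥ 1 is false
    have hA : isCapLoopA w n k P (k.toNat + n.toNat + 1) 0 0 0 = 0 := by
      rw [isCapLoopA, if_neg (by omega)]
    rw [hA]
    by_cases hn : 0 < n
    · refine (bsearchB_correct k w P 0 n ?_ (n.toNat + 1) 0 n le_rfl le_rfl (by omega) le_rfl
        (by omega)).symm
      intro m hm0 _
      unfold fitsB
      have hk : k.toNat = 0 := by omega
      rw [hk]
      simp only [fitsOuterB, decide_eq_true_eq]
    · rw [bsearchB, if_neg (by omega)]
  · -- first package exceeds P: A burns every track without moving, B's fits(m) fails for m ≥ 1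
    obtain ⟨w0, l, rfl⟩ : ∃ w0 l, w = w0 :: l := by
      cases w with
      | nil => exact absurd rfl hne
      | cons a l => exact ⟨a, l, rfl⟩
    have hw : PySem.List.pyGet? (w0 :: l) 0 = some w0 := PySem.List.pyGet?_zero_cons w0 l
    have hhd' : P < w0 := by simpa using hhd
    rw [loopA_stuck (w0 :: l) n k P w0 hw hhd' (k.toNat + n.toNat + 1) 0 (by omega)]
    by_cases hn : 0 < n
    · refine (bsearchB_correct k (w0 :: l) P 0 n ?_ (n.toNat + 1) 0 n le_rfl le_rfl (by omega)
        le_rfl (by omega)).symm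
      intro m hm0 _
      unfold fitsB
      rw [outerB_stuck (w0 :: l) P w0 hw hhd' k.toNat m]
      simp only [decide_eq_true_eq]
    · rw [bsearchB, if_neg (by omega)]
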